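-- pv_equiv track=rewrite | github.com/aintdoin/Split_Merge_Iterative_Reasoning | verl/utils/reward_score/hotpot.py | _is_idk_response
-- ===== SOURCE A (Python) =====
-- from typing import Dict, Tuple, Optional
--
-- def _is_idk_response(text: Optional[str]) -> bool:
--     if not isinstance(text, str):
--         return False
--     t = text.strip().lower()
--     patterns = [
--         "i don't know",
--         "i dont know",
--         "i am not sure",
--         "i'm not sure",
--         "cannot answer",
--         "can't answer",
--         "cannot determine",
--         "can't determine",
--         "insufficient information",
--         "not enough information",
--         "unknown",
--         "no sufficient information",
--     ]
--     for p in patterns: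
--         if p in t:
--             return True
--     return False
-- ===== SOURCE B (Python) =====
-- def _is_idk_response(text):
--     if not isinstance(text, str):
--         return False
--     s = text.strip().lower()
--     patterns = [
--         "i don't know",
--         "i dont know",
--         "i am not sure",
--         "i'm not sure",
--         "cannot answer",
--         "can't answer",
--         "cannot determine",
--         "can't determine",
--         "insufficient information",
--         "not enough information",
--         "unknown",
--         "no sufficient information",
--     ]
--
--     def starts_at(p, i):
--         # hand-written prefix comparison: does p occur in s starting at i?
--         if i + len(p) > len(s):
--             return False
--         for k in range(len(p)):
--             if p[k] != s[i + k]: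
--                 return False
--         return True
--
--     i = 0
--     while i < len(s):
--         for p in patterns:
--             if starts_at(p, i):
--                 return True
--         i += 1
--     return False
-- ===== Notes on version B (the rewrite author's own statement) =====
-- stated objective: alternative
-- what changed: Instead of twelve independent substring-containment library scans (one per phrase), B makes one explicit left-to-right walk over the text positions and at each position runs a hand-written character-by-character prefix comparison against each phrase.
import Mathlib
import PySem

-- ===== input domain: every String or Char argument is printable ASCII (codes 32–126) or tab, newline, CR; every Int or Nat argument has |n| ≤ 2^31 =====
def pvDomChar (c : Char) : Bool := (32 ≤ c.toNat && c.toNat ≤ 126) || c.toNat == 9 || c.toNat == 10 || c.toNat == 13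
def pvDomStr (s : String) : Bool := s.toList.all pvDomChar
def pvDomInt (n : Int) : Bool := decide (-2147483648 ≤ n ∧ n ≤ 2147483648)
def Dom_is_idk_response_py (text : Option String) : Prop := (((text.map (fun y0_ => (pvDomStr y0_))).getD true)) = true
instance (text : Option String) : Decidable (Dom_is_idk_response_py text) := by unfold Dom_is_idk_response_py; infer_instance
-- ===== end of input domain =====

-- B replaces A's twelve independent 'p in t' substring library scans by one explicit
-- left-to-right walk over the text positions with a hand-written character-by-character
-- prefix comparison at each position (alternative decomposition, same asymptotic cost).

-- ===== PORT A =====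
-- A's phrase list, verbatim
def idkPatterns : List String :=
  ["i don't know", "i dont know", "i am not sure", "i'm not sure",
   "cannot answer", "can't answer", "cannot determine", "can't determine",
   "insufficient information", "not enough information", "unknown",
   "no sufficient information"]

def is_idk_response_py (text : Option String) : Bool :=
  match text with
  | none => false                      -- not isinstance(text, str)
  | some s =>
    let t := PySem.Str.lower (PySem.Str.strip s)
    -- for p in patterns: if p in t: return True / return False
    idkPatterns.any (fun p => PySem.Str.isIn p t)

-- ===== PORT B =====
-- B's phrase list, as character lists (B compares character by character)
def pvBPatterns : List (List Char) :=
  (["i don't know", "i dont know", "i am not sure", "i'm not sure",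
    "cannot answer", "can't answer", "cannot determine", "can't determine",
    "insufficient information", "not enough information", "unknown",
    "no sufficient information"]).map String.toList

-- starts_at(p, i): hand-written prefix comparison, p against s[i:], char by char
def pvStartsAt : List Char → List Char → Bool
  | [], _ => true
  | _ :: _, [] => false
  | a :: ps, c :: rest => a == c && pvStartsAt ps rest

-- the while-loop 'i = 0; while i < len(s): …; i += 1', as recursion on the suffix s[i:]
def pvScan : List Char → Bool
  | [] => false
  | c :: rest => pvBPatterns.any (fun p => pvStartsAt p (c :: rest)) || pvScan rest

def is_idk_response_py_alt (text : Option String) : Bool :=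
  match text with
  | none => false
  | some s => pvScan ((PySem.Str.lower (PySem.Str.strip s)).toList)

-- ===== PRECONDITION & SPEC =====
def Spec_is_idk_response_py (text : Option String) (out : Bool) : Prop := out = is_idk_response_py_alt text
instance (text : Option String) (out : Bool) : Decidable (Spec_is_idk_response_py text out) := by unfold Spec_is_idk_response_py; infer_instance

-- ===== CLAIM =====
def Claim_equal_is_idk_response_py : Prop := ∀ (text : Option String), Dom_is_idk_response_py text → Spec_is_idk_response_py text (is_idk_response_py text)

-- ===== LEMMAS AND PROOFS =====

-- the hand-written prefix comparison is exactly "p is a prefix"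
theorem pvStartsAt_iff (p l : List Char) : pvStartsAt p l = true ↔ p <+: l := by
  induction p generalizing l with
  | nil => simp [pvStartsAt]
  | cons a ps ih =>
    cases l with
    | nil => simp [pvStartsAt]
    | cons c rest =>
      rw [show pvStartsAt (a :: ps) (c :: rest) = (a == c && pvStartsAt ps rest) from rfl]
      simp only [Bool.and_eq_true, beq_iff_eq, ih, List.cons_prefix_cons]

-- the suffix scan finds exactly the patterns occurring as an infix (no pattern is empty)
theorem pvScan_iff (cs : List Char) :
    pvScan cs = true ↔ ∃ p ∈ pvBPatterns, p <:+: cs := by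
  induction cs with
  | nil =>
    simp only [pvScan]
    constructor
    · intro h; exact absurd h (by decide)
    rintro ⟨p, hp, hinf⟩
    have : p = [] := List.infix_nil.mp hinf
    subst this
    revert hp; decide
  | cons c rest ih =>
    simp only [pvScan, Bool.or_eq_true, List.any_eq_true, pvStartsAt_iff, ih,
      List.infix_cons_iff]
    constructor
    · rintro (⟨p, hp, h⟩ | ⟨p, hp, h⟩)
      · exact ⟨p, hp, Or.inl h⟩
      · exact ⟨p, hp, Or.inr h⟩
    · rintro ⟨p, hp, h | h⟩
      · exact Or.inl ⟨p, hp, h⟩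
      · exact Or.inr ⟨p, hp, h⟩

-- A's pattern-by-pattern substring test, characterised the same way
theorem aSide_iff (cs : List Char) :
    idkPatterns.any (fun p => PySem.Chars.isIn p.toList cs) = true ↔
      ∃ p ∈ pvBPatterns, p <:+: cs := by
  simp only [List.any_eq_true, PySem.Chars.isIn_iff_infix, pvBPatterns, List.mem_map]
  constructor
  · rintro ⟨p, hp, h⟩; exact ⟨p.toList, ⟨p, hp, rfl⟩, h⟩
  · rintro ⟨_, ⟨p, hp, rfl⟩, h⟩; exact ⟨p, hp, h⟩

-- ===== VERDICT =====
theorem is_idk_response_py_spec : Claim_equal_is_idk_response_py := by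
  intro text _
  unfold Spec_is_idk_response_py
  cases text with
  | none => rfl
  | some s =>
    simp only [is_idk_response_py, is_idk_response_py_alt, PySem.Str.isIn_eq]
    rw [Bool.eq_iff_iff, aSide_iff, pvScan_iff]
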